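-- pv_equiv track=rewrite | github.com/nier2kirito/Spin_and_Go_Solver | canonical_representations.py | suit_arrangement
-- ===== SOURCE A (Python) =====
-- import itertools
--
-- suits = ['c', 'd', 'h', 's']
--
-- def suit_arrangement(partition):
--     suits_combinations = []
--     for index in range(len(partition)):
--         count = partition[index]
--         if index == 0:
--             for combination in itertools.permutations(suits, count):
--                 suits_combinations.append(tuple(sorted(combination)))
--         else:
--             new_combinations = []
--             for suit_combination in suits_combinations:
--                 for combination in itertools.permutations(suits, count):
--                     new_suit_combination = suit_combination + tuple(sorted(combination))
--                     new_combinations.append(new_suit_combination)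
--             suits_combinations = new_combinations
--     results = sorted(list(set(suits_combinations)))
--
--     # Filter out isomorphic arrangements
--     unique_arrangements = []
--     for result in results:
--         is_unique = True
--         for unique in unique_arrangements:
--             if is_isomorphic(result, unique, partition):
--                 is_unique = False
--                 break
--         if is_unique:
--             unique_arrangements.append(result)
--
--     return unique_arrangements
--
-- def is_isomorphic(suit_arrangement1, suit_arrangement2, rank_pattern):
--     # If lengths don't match, they can't be isomorphic
--     if len(suit_arrangement1) != len(suit_arrangement2):
--         return False
--
--     # Create a "signature" for each arrangement based on where each suit appears
--     signature1 = {}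
--     signature2 = {}
--
--     pos = 0
--     for group_idx, group_size in enumerate(rank_pattern):
--         for i in range(group_size):
--             suit1 = suit_arrangement1[pos + i]
--             suit2 = suit_arrangement2[pos + i]
--
--             if suit1 not in signature1:
--                 signature1[suit1] = []
--             if suit2 not in signature2:
--                 signature2[suit2] = []
--
--             signature1[suit1].append(group_idx)
--             signature2[suit2].append(group_idx)
--
--         pos += group_size
--
--     # Sort the signatures by their patterns
--     pattern1 = sorted(signature1.values())
--     pattern2 = sorted(signature2.values())
--     # If the patterns match, the arrangements are isomorphic
--     return pattern1 == pattern2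
-- ===== SOURCE B (Python) =====
-- import itertools
--
-- suits = ['c', 'd', 'h', 's']
--
-- def suit_arrangement(partition):
--     if not partition:
--         return []
--     # one sorted combination list per rank group; a count larger than the number of
--     # suits admits no arrangement at all
--     groups = []
--     for count in partition:
--         if count > len(suits):
--             return []
--         groups.append(list(itertools.combinations(suits, count)))
--     # the cartesian product of the groups enumerates exactly the distinct sorted
--     # arrangements, already in sorted order; dedup by canonical signature in one pass
--     canon = {}
--     for arrangement in itertools.product(*groups):
--         signature = {}
--         for group_idx, group in enumerate(arrangement):
--             for suit in group:
--                 signature.setdefault(suit, []).append(group_idx)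
--         key = tuple(map(tuple, sorted(signature.values())))
--         if key not in canon:
--             canon[key] = tuple(itertools.chain.from_iterable(arrangement))
--     return list(canon.values())
-- ===== Notes on version B (the rewrite author's own statement) =====
-- stated objective: faster
-- what changed: Instead of generating all suit permutations, sorting each, deduplicating via sorted(set(...)) and then filtering isomorphic arrangements with a quadratic all-pairs signature comparison, B takes the cartesian product of per-group sorted combinations (already distinct and in sorted order) and deduplicates in a single pass through a dict keyed by each arrangement's canonical signature.
import Mathlib
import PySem

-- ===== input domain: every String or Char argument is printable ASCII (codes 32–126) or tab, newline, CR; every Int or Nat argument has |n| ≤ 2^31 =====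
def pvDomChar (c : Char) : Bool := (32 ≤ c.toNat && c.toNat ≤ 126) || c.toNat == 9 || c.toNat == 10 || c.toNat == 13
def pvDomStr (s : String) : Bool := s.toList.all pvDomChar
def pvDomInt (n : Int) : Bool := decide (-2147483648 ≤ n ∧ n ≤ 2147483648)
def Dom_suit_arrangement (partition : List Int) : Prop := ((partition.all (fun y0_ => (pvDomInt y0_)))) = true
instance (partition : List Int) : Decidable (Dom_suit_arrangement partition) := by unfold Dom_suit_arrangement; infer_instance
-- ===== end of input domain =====

-- B replaces A's generate/sort/quadratic-isomorphism-filter by a cartesian product of per-group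
-- sorted combinations deduplicated in one pass through a dict keyed by the canonical signature.

-- ===== PORT A =====
def pySuits : List String := ["c", "d", "h", "s"]

def is_isomorphic (suit_arrangement1 suit_arrangement2 : List String) (rank_pattern : List Int) : Bool :=
  if suit_arrangement1.length ≠ suit_arrangement2.length then false
  else
    -- one loop building both signature dicts while tracking pos;
    -- "if suit not in sig: sig[suit] = []" followed by append is Dict.modify with default []
    let st :=
      (PySem.List.enumerate rank_pattern).foldl
        (fun (st : PySem.Dict String (List Int) × PySem.Dict String (List Int) × Int) gp =>
          let sigs :=
            (PySem.List.pyRange 0 gp.2 1).foldl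
              (fun (sigs : PySem.Dict String (List Int) × PySem.Dict String (List Int)) i =>
                (sigs.1.modify (PySem.List.pyGetD suit_arrangement1 (st.2.2 + i) "") [] (· ++ [gp.1]),
                 sigs.2.modify (PySem.List.pyGetD suit_arrangement2 (st.2.2 + i) "") [] (· ++ [gp.1])))
              (st.1, st.2.1)
          (sigs.1, sigs.2, st.2.2 + gp.2))
        (PySem.Dict.empty, PySem.Dict.empty, 0)
    PySem.List.sorted st.1.values (fun x => x) false == PySem.List.sorted st.2.1.values (fun x => x) false

def suit_arrangement (partition : List Int) : List (List String) :=
  let suits_combinations :=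
    (PySem.List.pyRange 0 (partition.length : Int) 1).foldl
      (fun suits_combinations index =>
        let count := PySem.List.pyGetD partition index 0
        if index == 0 then
          (PySem.List.permutations pySuits count.toNat).foldl
            (fun acc combination => acc ++ [PySem.List.sorted combination (fun x => x) false])
            suits_combinations
        else
          suits_combinations.foldl
            (fun new_combinations suit_combination =>
              (PySem.List.permutations pySuits count.toNat).foldl
                (fun new_combinations combination =>
                  new_combinations ++ [suit_combination ++ PySem.List.sorted combination (fun x => x) false])
                new_combinations)
            [])
      []
  let results := PySem.List.sorted (PySem.Set.ofList suits_combinations) (fun x => x) false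
  results.foldl
    (fun unique_arrangements result =>
      if unique_arrangements.any (fun u => is_isomorphic result u partition) then unique_arrangements
      else unique_arrangements ++ [result])
    []

-- ===== PORT B =====
-- the group-building loop with its early "return []" when a count exceeds len(suits)
def buildGroups : List Int → Option (List (List (List String)))
  | [] => some []
  | count :: rest =>
    if (pySuits.length : Int) < count then none
    else (buildGroups rest).map (fun gs => PySem.List.combinations pySuits count.toNat :: gs)

def suit_arrangement_alt (partition : List Int) : List (List String) :=
  if partition.isEmpty then []
  else
    match buildGroups partition with
    | none => []
    | some groups =>
    let prod := groups.foldl (fun acc g => acc.flatMap (fun t => g.map (fun x => t ++ [x]))) [[]]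
    let canon :=
      prod.foldl
        (fun (canon : PySem.Dict (List (List Int)) (List String)) arrangement =>
          let signature :=
            (PySem.List.enumerate arrangement).foldl
              (fun (sig : PySem.Dict String (List Int)) gi =>
                gi.2.foldl (fun sig suit => sig.modify suit [] (· ++ [gi.1])) sig)
              PySem.Dict.empty
          let key := PySem.List.sorted signature.values (fun x => x) false
          if canon.contains key then canon else canon.insert key arrangement.flatten)
        PySem.Dict.empty
    canon.values

-- ===== PRECONDITION & SPEC =====
-- Python's itertools.permutations (in A) and itertools.combinations (in B) raise ValueError on a
-- negative count; a negative entry is only reached while the accumulator is non-empty, i.e. unless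
-- some earlier entry exceeds len(suits). Pre_ admits exactly the partitions on which no raise happens.
def Pre_suit_arrangement (partition : List Int) : Prop :=
  ∀ i < partition.length, partition.getD i 0 < 0 → ∃ x ∈ partition.take i, (4:Int) < x
instance (partition : List Int) : Decidable (Pre_suit_arrangement partition) := by
  unfold Pre_suit_arrangement; infer_instance
def pvWitness_suit_arrangement : List Int := [2, 1]

def Spec_suit_arrangement (partition : List Int) (out : List (List String)) : Prop := out = suit_arrangement_alt partition
instance (partition : List Int) (out : List (List String)) : Decidable (Spec_suit_arrangement partition out) := by unfold Spec_suit_arrangement; infer_instance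

-- ===== CLAIM (what is proved, stated in full; the proofs are below) =====
def Claim_equal_suit_arrangement : Prop := ∀ (partition : List Int), Dom_suit_arrangement partition → Pre_suit_arrangement partition → Spec_suit_arrangement partition (suit_arrangement partition)

-- ===== LEMMAS AND PROOFS =====

-- proof-side names for the pieces of the two programs
def sortId (t : List String) : List String := PySem.List.sorted t (fun x => x) false
def piecesA (c : Int) : List (List String) := (PySem.List.permutations pySuits c.toNat).map sortId
def piecesB (c : Int) : List (List String) := PySem.List.combinations pySuits c.toNat
def gstep (f : Int → List (List String)) (acc : List (List String)) (c : Int) : List (List String) :=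
  acc.flatMap (fun s => (f c).map (fun t => s ++ t))
def genW (f : Int → List (List String)) (p : List Int) : List (List String) := p.foldl (gstep f) [[]]
def prodStep (acc : List (List (List String))) (g : List (List String)) : List (List (List String)) :=
  acc.flatMap (fun t => g.map (fun x => t ++ [x]))
def prodG (p : List Int) : List (List (List String)) := (p.map piecesB).foldl prodStep [[]]

-- the exact generation loop of port A, named
def agen (partition : List Int) : List (List String) :=
  (PySem.List.pyRange 0 (partition.length : Int) 1).foldl
    (fun suits_combinations index =>
      let count := PySem.List.pyGetD partition index 0
      if index == 0 then
        (PySem.List.permutations pySuits count.toNat).foldl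
          (fun acc combination => acc ++ [PySem.List.sorted combination (fun x => x) false])
          suits_combinations
      else
        suits_combinations.foldl
          (fun new_combinations suit_combination =>
            (PySem.List.permutations pySuits count.toNat).foldl
              (fun new_combinations combination =>
                new_combinations ++ [suit_combination ++ PySem.List.sorted combination (fun x => x) false])
              new_combinations)
          [])
    []

-- instance-irrelevance for PySem.List.sorted
theorem sorted_decInst_irrel {α κ : Type} [i : LT κ] (d1 d2 : @DecidableLT κ i)
    (xs : List α) (key : α → κ) (rev : Bool) :
    @PySem.List.sorted α κ i d1 xs key rev = @PySem.List.sorted α κ i d2 xs key rev := by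
  rw [Subsingleton.elim d1 d2]

theorem sorted_LT_irrel {α κ : Type} (i1 i2 : LT κ) (d1 : @DecidableLT κ i1) (d2 : @DecidableLT κ i2)
    (h : ∀ a b : κ, @LT.lt κ i1 a b ↔ @LT.lt κ i2 a b) (xs : List α) (key : α → κ) (rev : Bool) :
    @PySem.List.sorted α κ i1 d1 xs key rev = @PySem.List.sorted α κ i2 d2 xs key rev := by
  have hi : i1 = i2 := by
    cases i1; cases i2
    congr 1; funext a b; exact propext (h a b)
  subst hi
  rw [Subsingleton.elim d1 d2]

-- a kernel-reducible DecidableLT String (via toList), so that `decide` can evaluate sortId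
@[reducible] def strLtDec : DecidableLT String :=
  fun a b => decidable_of_iff (a.toList < b.toList) (String.lt_iff_toList_lt).symm
def sortIdR (t : List String) : List String := @PySem.List.sorted _ _ _ strLtDec t (fun x => x) false
theorem sortId_eq_R : sortId = sortIdR :=
  funext fun t => sorted_decInst_irrel _ strLtDec t _ false

-- the distinct sorted r-permutations of the suits are exactly the r-combinations
theorem pieces_mem (c : Int) (t : List String) : t ∈ piecesA c ↔ t ∈ piecesB c := by
  unfold piecesA piecesB
  rw [sortId_eq_R]
  by_cases h4 : c.toNat ≤ 4
  · set k := c.toNat with hk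
    interval_cases k
    · rw [← PySem.Set.mem_ofList ((PySem.List.permutations pySuits 0).map sortIdR),
        show PySem.Set.ofList ((PySem.List.permutations pySuits 0).map sortIdR) = PySem.List.combinations pySuits 0 from by decide]
    · rw [← PySem.Set.mem_ofList ((PySem.List.permutations pySuits 1).map sortIdR),
        show PySem.Set.ofList ((PySem.List.permutations pySuits 1).map sortIdR) = PySem.List.combinations pySuits 1 from by decide]
    · rw [← PySem.Set.mem_ofList ((PySem.List.permutations pySuits 2).map sortIdR),
        show PySem.Set.ofList ((PySem.List.permutations pySuits 2).map sortIdR) = PySem.List.combinations pySuits 2 from by decide]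
    · rw [← PySem.Set.mem_ofList ((PySem.List.permutations pySuits 3).map sortIdR),
        show PySem.Set.ofList ((PySem.List.permutations pySuits 3).map sortIdR) = PySem.List.combinations pySuits 3 from by decide]
    · rw [← PySem.Set.mem_ofList ((PySem.List.permutations pySuits 4).map sortIdR),
        show PySem.Set.ofList ((PySem.List.permutations pySuits 4).map sortIdR) = PySem.List.combinations pySuits 4 from by decide]
  · have h5 : 4 < c.toNat := by omega
    rw [PySem.List.permutations_eq_nil_of_length_lt _ _ (by simpa [pySuits] using h5),
      PySem.List.combinations_eq_nil_of_length_lt _ (by simpa [pySuits] using h5)]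
    simp

-- A's inner product loop, rewritten as a flatMap step
theorem else_branch_eq (acc : List (List String)) (cnt : Int) :
    acc.foldl
      (fun new_combinations suit_combination =>
        (PySem.List.permutations pySuits cnt.toNat).foldl
          (fun new_combinations combination =>
            new_combinations ++ [suit_combination ++ PySem.List.sorted combination (fun x => x) false])
          new_combinations)
      [] = gstep piecesA acc cnt := by
  have h1 : ∀ (n : List (List String)) (s : List String),
      (PySem.List.permutations pySuits cnt.toNat).foldl
        (fun n combination => n ++ [s ++ PySem.List.sorted combination (fun x => x) false]) n
      = n ++ (piecesA cnt).map (fun t => s ++ t) := by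
    intro n s
    rw [PySem.List.foldl_append_singleton_eq_map (fun combination => s ++ PySem.List.sorted combination (fun x => x) false)]
    simp [piecesA, sortId]
  rw [PySem.List.foldl_congr_mem (f := fun new_combinations suit_combination =>
        (PySem.List.permutations pySuits cnt.toNat).foldl
          (fun new_combinations combination =>
            new_combinations ++ [suit_combination ++ PySem.List.sorted combination (fun x => x) false])
          new_combinations)
      (g := fun n s => n ++ (piecesA cnt).map (fun t => s ++ t)) (init := []) (l := acc)
      (fun n s _ => h1 n s)]
  rw [PySem.List.foldl_append_eq_flatMap (fun s => (piecesA cnt).map (fun t => s ++ t))]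
  simp [gstep]

-- A's generation loop is the fold of gstep piecesA
theorem agen_eq (c : Int) (cs : List Int) : agen (c :: cs) = genW piecesA (c :: cs) := by
  unfold agen
  rw [PySem.List.pyRange_one_cons (by simp)]
  rw [List.foldl_cons]
  simp only [PySem.List.pyGetD_zero_cons, beq_self_eq_true, if_pos]
  rw [PySem.List.foldl_append_singleton_eq_map (fun combination => PySem.List.sorted combination (fun x => x) false)]
  have h01 : (0:Int) + 1 = 1 := by norm_num
  rw [h01]
  have hcong : ∀ (acc : List (List String)), ∀ j ∈ PySem.List.pyRange 1 ((c :: cs).length : Int) 1,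
      (fun suits_combinations index =>
        if (index == (0:Int)) = true then
          List.foldl (fun acc combination => acc ++ [PySem.List.sorted combination fun x => x]) suits_combinations
            (PySem.List.permutations pySuits (PySem.List.pyGetD (c :: cs) index 0).toNat)
        else
          List.foldl
            (fun new_combinations suit_combination =>
              List.foldl
                (fun new_combinations combination =>
                  new_combinations ++ [suit_combination ++ PySem.List.sorted combination fun x => x])
                new_combinations (PySem.List.permutations pySuits (PySem.List.pyGetD (c :: cs) index 0).toNat))
            [] suits_combinations) acc j
      = gstep piecesA acc (PySem.List.pyGetD (c :: cs) j 0) := by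
    intro acc j hj
    have hj1 : 1 ≤ j := (PySem.List.mem_pyRange_one.mp hj).1
    simp only []
    rw [if_neg (by simp; omega)]
    exact else_branch_eq acc _
  rw [PySem.List.foldl_congr_mem _ _ _ _ hcong]
  rw [show ((c :: cs).length : Int) = PySem.List.len (c :: cs) from rfl]
  rw [PySem.List.foldl_pyRange_pyGetD (c :: cs) 0 (gstep piecesA) _ (by norm_num : (0:Int) ≤ 1)]
  simp only [Int.toNat_one, List.drop_one, List.tail_cons]
  show cs.foldl (gstep piecesA) ([] ++ piecesA c) = genW piecesA (c :: cs)
  unfold genW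
  rw [List.foldl_cons]
  congr 1
  simp [gstep]

-- B's grouped product, flattened, is the fold of gstep piecesB
theorem map_flatten_foldl (p : List Int) : ∀ acc : List (List (List String)),
    ((p.map piecesB).foldl prodStep acc).map List.flatten = p.foldl (gstep piecesB) (acc.map List.flatten) := by
  induction p with
  | nil => intro acc; simp
  | cons c cs ih =>
    intro acc
    rw [List.map_cons, List.foldl_cons, List.foldl_cons, ih]
    congr 1
    simp [prodStep, gstep, List.map_flatMap, Function.comp_def, List.flatMap_map]

theorem prodG_flatten (p : List Int) : (prodG p).map List.flatten = genW piecesB p := by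
  unfold prodG genW
  rw [map_flatten_foldl]
  rfl

-- membership through the generator fold only depends on piece membership
theorem mem_gstep_foldl_congr (f g : Int → List (List String)) (p : List Int)
    (hfg : ∀ c ∈ p, ∀ t, t ∈ f c ↔ t ∈ g c) :
    ∀ (acc1 acc2 : List (List String)), (∀ y, y ∈ acc1 ↔ y ∈ acc2) →
    ∀ y, y ∈ p.foldl (gstep f) acc1 ↔ y ∈ p.foldl (gstep g) acc2 := by
  induction p with
  | nil => intro acc1 acc2 h y; simpa using h y
  | cons c cs ih =>
    intro acc1 acc2 h y
    rw [List.foldl_cons, List.foldl_cons]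
    refine ih (fun c' hc' => hfg c' (List.mem_cons_of_mem _ hc')) _ _ ?_ y
    intro z
    simp only [gstep, List.mem_flatMap, List.mem_map]
    constructor
    · rintro ⟨s, hs, t, ht, rfl⟩
      exact ⟨s, (h s).mp hs, t, (hfg c (List.mem_cons_self) t).mp ht, rfl⟩
    · rintro ⟨s, hs, t, ht, rfl⟩
      exact ⟨s, (h s).mpr hs, t, (hfg c (List.mem_cons_self) t).mpr ht, rfl⟩

-- membership in the grouped product
theorem mem_prod_foldl (p : List Int) : ∀ (acc : List (List (List String))) (arr : List (List String)),
    (arr ∈ (p.map piecesB).foldl prodStep acc ↔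
      ∃ t ∈ acc, ∃ gs, List.Forall₂ (fun g c => g ∈ piecesB c) gs p ∧ arr = t ++ gs) := by
  induction p with
  | nil =>
    intro acc arr
    simp [List.forall₂_nil_right_iff]
  | cons c cs ih =>
    intro acc arr
    rw [List.map_cons, List.foldl_cons, ih]
    constructor
    · rintro ⟨t', ht', gs', hgs', rfl⟩
      rw [prodStep, List.mem_flatMap] at ht'
      obtain ⟨t, ht, hmem⟩ := ht'
      rw [List.mem_map] at hmem
      obtain ⟨x, hx, rfl⟩ := hmem
      exact ⟨t, ht, x :: gs', List.Forall₂.cons hx hgs', by simp⟩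
    · rintro ⟨t, ht, gs, hgs, rfl⟩
      rcases hgs with _ | ⟨hx, hgs'⟩
      rename_i x gs'
      refine ⟨t ++ [x], ?_, gs', hgs', by simp⟩
      rw [prodStep, List.mem_flatMap]
      exact ⟨t, ht, List.mem_map.mpr ⟨x, hx, rfl⟩⟩

-- lexicographic facts
theorem lt_append_right {α : Type} [LinearOrder α] (a : List α) {u v : List α} (h : u < v) :
    a ++ u < a ++ v := by
  induction a with
  | nil => exact h
  | cons x xs ih => exact List.Lex.cons ih

theorem lt_append_left {α : Type} [LinearOrder α] {a b : List α} (u v : List α)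
    (h : a < b) (hlen : a.length = b.length) : a ++ u < b ++ v := by
  have h' : List.Lex (· < ·) a b := h
  clear h
  induction h' with
  | nil => simp at hlen
  | @rel x xs y ys hr => exact List.Lex.rel hr
  | @cons x xs ys hlex ih => exact List.Lex.cons (ih (by simpa using hlen))

theorem pySuits_pairwise : pySuits.Pairwise (· < ·) := by
  have h : ∀ a b : String, a.toList < b.toList → a < b := fun a b h => String.lt_iff_toList_lt.mpr h
  unfold pySuits
  refine List.Pairwise.cons ?_ (List.Pairwise.cons ?_ (List.Pairwise.cons ?_ (List.Pairwise.cons ?_ List.Pairwise.nil)))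
  all_goals intro y hy
  all_goals fin_cases hy <;> exact h _ _ (by decide)

-- combinations of a strictly sorted list are generated in strictly increasing order
theorem comb_pairwise {α : Type} [LinearOrder α] : ∀ (xs : List α), xs.Pairwise (· < ·) →
    ∀ k, (PySem.List.combinations xs k).Pairwise (· < ·) := by
  intro xs
  induction xs with
  | nil =>
    intro _ k
    cases k with
    | zero => simp [PySem.List.combinations_zero]
    | succ k => simp [PySem.List.combinations_nil_succ]
  | cons x rest ih =>
    intro hpw k
    cases k with
    | zero => simp [PySem.List.combinations_zero]
    | succ k =>
      rw [PySem.List.combinations_cons_succ, List.pairwise_append]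
      have hx : ∀ y ∈ rest, x < y := fun y hy => (List.pairwise_cons.mp hpw).1 y hy
      have hrest := (List.pairwise_cons.mp hpw).2
      refine ⟨?_, ih hrest (k+1), ?_⟩
      · rw [List.pairwise_map]
        exact (ih hrest k).imp (fun h => List.Lex.cons h)
      · rintro a ha b hb
        rw [List.mem_map] at ha
        obtain ⟨a', _, rfl⟩ := ha
        have hsub := (PySem.List.mem_combinations_iff rest (k+1) b).mp hb
        cases hb2 : b with
        | nil => exfalso; have := hsub.2; simp [hb2] at this
        | cons y b' =>
          have hy : y ∈ rest := hsub.1.subset (by simp [hb2])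
          exact List.Lex.rel (hx y hy)

theorem length_of_mem_piecesB {c : Int} {t : List String} (h : t ∈ piecesB c) : t.length = c.toNat :=
  ((PySem.List.mem_combinations_iff _ _ _).mp h).2

-- the B generator is strictly sorted and its elements all have the same length
theorem genW_pairwise_unif (p : List Int) : ∀ (acc : List (List String)),
    acc.Pairwise (· < ·) → (∀ a ∈ acc, ∀ b ∈ acc, a.length = b.length) →
    (p.foldl (gstep piecesB) acc).Pairwise (· < ·) ∧
      (∀ a ∈ p.foldl (gstep piecesB) acc, ∀ b ∈ p.foldl (gstep piecesB) acc, a.length = b.length) := by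
  induction p with
  | nil => intro acc h1 h2; exact ⟨h1, h2⟩
  | cons c cs ih =>
    intro acc h1 h2
    rw [List.foldl_cons]
    have hcomb : (piecesB c).Pairwise (· < ·) := comb_pairwise pySuits pySuits_pairwise _
    refine ih _ ?_ ?_
    · rw [gstep, List.pairwise_flatMap]
      refine ⟨?_, ?_⟩
      · intro s _
        rw [List.pairwise_map]
        exact hcomb.imp (fun h => lt_append_right s h)
      · refine h1.imp_of_mem ?_
        intro s1 s2 hs1 hs2 hlt x hx y hy
        rw [List.mem_map] at hx hy
        obtain ⟨t1, _, rfl⟩ := hx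
        obtain ⟨t2, _, rfl⟩ := hy
        exact lt_append_left t1 t2 hlt (h2 s1 hs1 s2 hs2)
    · intro a ha b hb
      rw [gstep, List.mem_flatMap] at ha hb
      obtain ⟨s1, hs1, ha⟩ := ha
      obtain ⟨s2, hs2, hb⟩ := hb
      rw [List.mem_map] at ha hb
      obtain ⟨t1, ht1, rfl⟩ := ha
      obtain ⟨t2, ht2, rfl⟩ := hb
      simp [h2 s1 hs1 s2 hs2, length_of_mem_piecesB ht1, length_of_mem_piecesB ht2]

-- A's sorted deduplicated results are exactly B's generator output
theorem results_sorted_eq (c : Int) (cs : List Int) :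
    PySem.List.sorted (PySem.Set.ofList (agen (c :: cs))) (fun x => x) false = genW piecesB (c :: cs) := by
  rw [sorted_LT_irrel List.instLT LinearOrder.toPartialOrder.toLT _ LinearOrder.toDecidableLT (fun a b => Iff.rfl)]
  have hpw : (genW piecesB (c :: cs)).Pairwise (· < ·) :=
    (genW_pairwise_unif (c :: cs) [[]] (by simp) (by simp)).1
  apply PySem.List.sorted_eq_of_perm_of_pairwise_lt
  · rw [List.perm_ext_iff_of_nodup (hpw.imp ne_of_lt) (PySem.Set.nodup_ofList _)]
    intro y
    rw [PySem.Set.mem_ofList, agen_eq]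
    exact (mem_gstep_foldl_congr piecesA piecesB (c :: cs) (fun c' _ => pieces_mem c') [[]] [[]] (fun _ => Iff.rfl) y).symm
  · exact hpw

-- ===== signature machinery =====
def sigStep (sa : List String) (st : PySem.Dict String (List Int) × Int) (gp : Int × Int) :
    PySem.Dict String (List Int) × Int :=
  ((PySem.List.pyRange 0 gp.2 1).foldl
      (fun d i => d.modify (PySem.List.pyGetD sa (st.2 + i) "") [] (· ++ [gp.1])) st.1,
   st.2 + gp.2)

def sigOf (p : List Int) (sa : List String) : PySem.Dict String (List Int) :=
  ((PySem.List.enumerate p).foldl (sigStep sa) (PySem.Dict.empty, 0)).1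

def keyOf (p : List Int) (sa : List String) : List (List Int) :=
  PySem.List.sorted (sigOf p sa).values (fun x => x) false

-- the fused two-signature loop of is_isomorphic splits into two independent signature folds
theorem iso_fold_split (sa1 sa2 : List String) : ∀ (l : List (Int × Int))
    (d1 d2 : PySem.Dict String (List Int)) (pos : Int),
    l.foldl
      (fun (st : PySem.Dict String (List Int) × PySem.Dict String (List Int) × Int) gp =>
        let sigs :=
          (PySem.List.pyRange 0 gp.2 1).foldl
            (fun (sigs : PySem.Dict String (List Int) × PySem.Dict String (List Int)) i =>
              (sigs.1.modify (PySem.List.pyGetD sa1 (st.2.2 + i) "") [] (· ++ [gp.1]),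
               sigs.2.modify (PySem.List.pyGetD sa2 (st.2.2 + i) "") [] (· ++ [gp.1])))
            (st.1, st.2.1)
        (sigs.1, sigs.2, st.2.2 + gp.2))
      (d1, d2, pos)
    = ((l.foldl (sigStep sa1) (d1, pos)).1, (l.foldl (sigStep sa2) (d2, pos)).1,
        (l.foldl (sigStep sa1) (d1, pos)).2) := by
  intro l
  induction l with
  | nil => intro d1 d2 pos; rfl
  | cons gp l ih =>
    intro d1 d2 pos
    rw [List.foldl_cons, List.foldl_cons, List.foldl_cons]
    have hX := PySem.List.foldl_prod_mk
      (fun d i => PySem.Dict.modify d (PySem.List.pyGetD sa1 (pos + i) "") [] (· ++ [gp.1]))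
      (fun d i => PySem.Dict.modify d (PySem.List.pyGetD sa2 (pos + i) "") [] (· ++ [gp.1]))
      (PySem.List.pyRange 0 gp.2 1) d1 d2
    show List.foldl _
      (((PySem.List.pyRange 0 gp.2 1).foldl
        (fun (sigs : PySem.Dict String (List Int) × PySem.Dict String (List Int)) i =>
          (sigs.1.modify (PySem.List.pyGetD sa1 (pos + i) "") [] (· ++ [gp.1]),
           sigs.2.modify (PySem.List.pyGetD sa2 (pos + i) "") [] (· ++ [gp.1])))
        (d1, d2)).1,
       ((PySem.List.pyRange 0 gp.2 1).foldl
        (fun (sigs : PySem.Dict String (List Int) × PySem.Dict String (List Int)) i =>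
          (sigs.1.modify (PySem.List.pyGetD sa1 (pos + i) "") [] (· ++ [gp.1]),
           sigs.2.modify (PySem.List.pyGetD sa2 (pos + i) "") [] (· ++ [gp.1])))
        (d1, d2)).2, pos + gp.2) l = _
    rw [hX]
    show List.foldl _ ((sigStep sa1 (d1, pos) gp).1, (sigStep sa2 (d2, pos) gp).1, pos + gp.2) l = _
    have := ih (sigStep sa1 (d1, pos) gp).1 (sigStep sa2 (d2, pos) gp).1 (pos + gp.2)
    rw [this]
    have h1 : ((sigStep sa1 (d1, pos) gp).1, pos + gp.2) = sigStep sa1 (d1, pos) gp := rfl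
    have h2 : ((sigStep sa2 (d2, pos) gp).1, pos + gp.2) = sigStep sa2 (d2, pos) gp := rfl
    rw [h1, h2]

theorem is_iso_eq (r u : List String) (p : List Int) (hlen : r.length = u.length) :
    is_isomorphic r u p = (keyOf p r == keyOf p u) := by
  unfold is_isomorphic
  rw [if_neg (by simpa using hlen)]
  rw [iso_fold_split r u (PySem.List.enumerate p) PySem.Dict.empty PySem.Dict.empty 0]
  rfl

-- the inner index loop of the signature pass reads exactly the current group
theorem innerA (g rest pre : List String) (d : PySem.Dict String (List Int)) (gi : Int) :
    (PySem.List.pyRange 0 ((g.length : Int)) 1).foldl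
      (fun d i => d.modify (PySem.List.pyGetD (pre ++ (g ++ rest)) (((pre.length : Int)) + i) "") [] (· ++ [gi])) d
    = g.foldl (fun d suit => d.modify suit [] (· ++ [gi])) d := by
  have hc : ∀ (d : PySem.Dict String (List Int)), ∀ i ∈ PySem.List.pyRange 0 ((g.length : Int)) 1,
      (fun d i => PySem.Dict.modify d (PySem.List.pyGetD (pre ++ (g ++ rest)) (((pre.length : Int)) + i) "") [] (· ++ [gi])) d i
      = (fun d i => PySem.Dict.modify d (PySem.List.pyGetD g i "") [] (· ++ [gi])) d i := by
    intro d i hi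
    obtain ⟨h0, hlt⟩ := PySem.List.mem_pyRange_one.mp hi
    have hig : i.toNat < g.length := by omega
    have e1 : PySem.List.pyGetD (pre ++ (g ++ rest)) (((pre.length : Int)) + i) "" = g[i.toNat] := by
      rw [PySem.List.pyGetD_eq_getElem _ "" (by omega) (by simp; omega)]
      have : ((pre.length : Int) + i).toNat = pre.length + i.toNat := by omega
      simp only [this]
      rw [List.getElem_append_right (by omega)]
      simp only [Nat.add_sub_cancel_left]
      rw [List.getElem_append_left hig]
    have e2 : PySem.List.pyGetD g i "" = g[i.toNat] :=
      PySem.List.pyGetD_eq_getElem _ "" (by omega) (by omega)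
    simp only [e1, e2]
  rw [PySem.List.foldl_congr_mem _ _ _ _ hc]
  exact PySem.List.foldl_pyRange_zero_pyGetD' g "" (fun d suit => PySem.Dict.modify d suit [] (· ++ [gi])) d

-- the positional signature pass over a flat arrangement equals the grouped pass of B
theorem sig_flat_gen : ∀ (arr : List (List String)) (p : List Int),
    List.Forall₂ (fun (g : List String) (c : Int) => (g.length : Int) = c) arr p →
    ∀ (start : Int) (d : PySem.Dict String (List Int)) (pre : List String),
    (PySem.List.enumerate p start).foldl (sigStep (pre ++ arr.flatten)) (d, (pre.length : Int))
      = ((PySem.List.enumerate arr start).foldl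
          (fun sig gi => gi.2.foldl (fun (sig : PySem.Dict String (List Int)) suit => sig.modify suit [] (· ++ [gi.1])) sig) d,
         (pre.length : Int) + (arr.flatten.length : Int)) := by
  intro arr p hf
  induction hf with
  | nil =>
    intro start d pre
    simp [PySem.List.enumerate]
  | @cons g c arr' cs hgc htail ih =>
    intro start d pre
    rw [PySem.List.enumerate_cons, PySem.List.enumerate_cons, List.foldl_cons, List.foldl_cons]
    have hsa : pre ++ (g :: arr').flatten = (pre ++ g) ++ arr'.flatten := by simp
    have hstep : sigStep (pre ++ (g :: arr').flatten) (d, (pre.length : Int)) (start, c)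
        = (g.foldl (fun (d : PySem.Dict String (List Int)) suit => d.modify suit [] (· ++ [start])) d,
           ((pre ++ g).length : Int)) := by
      unfold sigStep
      simp only [Prod.mk.injEq]
      refine ⟨?_, ?_⟩
      · rw [← hgc]
        rw [show pre ++ (g :: arr').flatten = pre ++ (g ++ arr'.flatten) from by simp]
        exact innerA g arr'.flatten pre d start
      · rw [← hgc]; simp
    rw [hstep]
    have := ih (start + 1) (g.foldl (fun (d : PySem.Dict String (List Int)) suit => d.modify suit [] (· ++ [start])) d) (pre ++ g)
    rw [hsa, this]
    simp only [Prod.mk.injEq]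
    refine ⟨?_, ?_⟩
    · trivial
    · simp; ring

-- ===== dedup machinery =====
-- B's dedup step, named
def bstep (canon : PySem.Dict (List (List Int)) (List String)) (arrangement : List (List String)) :
    PySem.Dict (List (List Int)) (List String) :=
  let signature :=
    (PySem.List.enumerate arrangement).foldl
      (fun (sig : PySem.Dict String (List Int)) gi =>
        gi.2.foldl (fun sig suit => sig.modify suit [] (· ++ [gi.1])) sig)
      PySem.Dict.empty
  let key := PySem.List.sorted signature.values (fun x => x) false
  if canon.contains key then canon else canon.insert key arrangement.flatten

def bkey (arrangement : List (List String)) : List (List Int) :=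
  PySem.List.sorted
    ((PySem.List.enumerate arrangement).foldl
      (fun (sig : PySem.Dict String (List Int)) gi =>
        gi.2.foldl (fun sig suit => sig.modify suit [] (· ++ [gi.1])) sig)
      PySem.Dict.empty).values (fun x => x) false

theorem bstep_eq (canon : PySem.Dict (List (List Int)) (List String)) (arrangement : List (List String)) :
    bstep canon arrangement =
      if canon.contains (bkey arrangement) then canon
      else canon.insert (bkey arrangement) arrangement.flatten := rfl

-- B's group-wise key is A's positional key of the flattened arrangement
theorem bkey_eq (p : List Int) (arr : List (List String))
    (hlen : List.Forall₂ (fun (g : List String) (c : Int) => (g.length : Int) = c) arr p) :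
    bkey arr = keyOf p arr.flatten := by
  unfold keyOf sigOf
  have h := sig_flat_gen arr p hlen 0 PySem.Dict.empty []
  rw [List.nil_append] at h
  rw [show ((List.length ([] : List String) : Int)) = (0 : Int) from rfl] at h
  rw [h]
  rfl

-- A's quadratic isomorphism filter equals B's one-pass dict dedup
theorem dedup (p : List Int) : ∀ (l : List (List (List String))) (uniq : List (List String))
    (canon : PySem.Dict (List (List Int)) (List String)),
    canon.items = uniq.map (fun r => (keyOf p r, r)) →
    (∀ arr ∈ l, bkey arr = keyOf p arr.flatten) →
    (∀ arr ∈ l, ∀ u ∈ uniq, arr.flatten.length = u.length) →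
    (∀ arr ∈ l, ∀ arr' ∈ l, arr.flatten.length = arr'.flatten.length) →
    l.foldl (fun uniq arr =>
        if uniq.any (fun u => is_isomorphic arr.flatten u p) then uniq else uniq ++ [arr.flatten]) uniq
      = (l.foldl bstep canon).values := by
  intro l
  induction l with
  | nil =>
    intro uniq canon h1 _ _ _
    show uniq = canon.values
    show uniq = canon.items.map (·.2)
    rw [h1, List.map_map]
    simp [Function.comp_def]
  | cons arr l' ih =>
    intro uniq canon h1 h2 h3 h4
    rw [List.foldl_cons, List.foldl_cons, bstep_eq, h2 arr List.mem_cons_self]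
    have hcond : (uniq.any (fun u => is_isomorphic arr.flatten u p))
        = canon.contains (keyOf p arr.flatten) := by
      rw [PySem.Dict.contains_eq_decide_mem_keys]
      have hkeys : canon.keys = uniq.map (keyOf p) := by
        show canon.items.map (·.1) = _
        rw [h1, List.map_map]; rfl
      rw [hkeys]
      rcases Bool.eq_false_or_eq_true (uniq.any (fun u => is_isomorphic arr.flatten u p)) with h | h
      · rw [h]
        symm
        rw [decide_eq_true_iff]
        rw [List.any_eq_true] at h
        obtain ⟨u, hu, hiso⟩ := h
        rw [is_iso_eq _ _ _ (h3 arr List.mem_cons_self u hu), beq_iff_eq] at hiso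
        exact List.mem_map.mpr ⟨u, hu, hiso.symm⟩
      · rw [h]
        symm
        rw [decide_eq_false_iff_not]
        intro hmem
        rw [List.mem_map] at hmem
        obtain ⟨u, hu, hk⟩ := hmem
        have hiso : is_isomorphic arr.flatten u p = true := by
          rw [is_iso_eq _ _ _ (h3 arr List.mem_cons_self u hu)]
          rw [beq_iff_eq]; exact hk.symm
        rw [List.any_eq_false] at h
        exact absurd hiso (by simp [h u hu])
    rw [hcond]
    rcases Bool.eq_false_or_eq_true (canon.contains (keyOf p arr.flatten)) with h | h
    · rw [h, if_pos rfl, if_pos rfl]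
      exact ih uniq canon h1 (fun a ha => h2 a (List.mem_cons_of_mem _ ha))
        (fun a ha u hu => h3 a (List.mem_cons_of_mem _ ha) u hu)
        (fun a ha a' ha' => h4 a (List.mem_cons_of_mem _ ha) a' (List.mem_cons_of_mem _ ha'))
    · rw [h, if_neg (by simp), if_neg (by simp)]
      refine ih (uniq ++ [arr.flatten]) (canon.insert (keyOf p arr.flatten) arr.flatten) ?_ ?_ ?_ ?_
      · rw [PySem.Dict.items_insert_of_not_contains _ _ h, h1, List.map_append]
        rfl
      · exact fun a ha => h2 a (List.mem_cons_of_mem _ ha)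
      · intro a ha u hu
        rw [List.mem_append] at hu
        rcases hu with hu | hu
        · exact h3 a (List.mem_cons_of_mem _ ha) u hu
        · rw [List.mem_singleton] at hu
          subst hu
          exact h4 a (List.mem_cons_of_mem _ ha) arr List.mem_cons_self
      · exact fun a ha a' ha' => h4 a (List.mem_cons_of_mem _ ha) a' (List.mem_cons_of_mem _ ha')

-- shapes of product members
theorem shape_len (p : List Int) (hpre : ∀ x ∈ p, 0 ≤ x) :
    ∀ (arr : List (List String)), List.Forall₂ (fun g c => g ∈ piecesB c) arr p →
    List.Forall₂ (fun (g : List String) (c : Int) => (g.length : Int) = c) arr p := by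
  induction p with
  | nil => intro arr h; rw [List.forall₂_nil_right_iff] at h; subst h; exact List.Forall₂.nil
  | cons c cs ih =>
    intro arr h
    rcases h with _ | ⟨hg, htl⟩
    rename_i g arr'
    refine List.Forall₂.cons ?_ (ih (fun c' hc' => hpre c' (List.mem_cons_of_mem _ hc')) arr' htl)
    rw [length_of_mem_piecesB hg]
    have := hpre c List.mem_cons_self
    omega

theorem flat_sum (arr : List (List String)) (p : List Int)
    (h : List.Forall₂ (fun (g : List String) (c : Int) => (g.length : Int) = c) arr p) :
    (arr.flatten.length : Int) = p.sum := by
  induction h with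
  | nil => simp
  | @cons g c arr' cs hgc _ ih => simp [List.length_append, ← hgc, ← ih]

-- buildGroups facts
theorem buildGroups_some (p : List Int) (h : ∀ x ∈ p, x ≤ (4:Int)) :
    buildGroups p = some (p.map piecesB) := by
  induction p with
  | nil => rfl
  | cons c cs ih =>
    rw [buildGroups, if_neg (by have := h c List.mem_cons_self; simp [pySuits]; omega)]
    rw [ih (fun x hx => h x (List.mem_cons_of_mem _ hx))]
    rfl

theorem buildGroups_none (p : List Int) (h : ∃ x ∈ p, (4:Int) < x) :
    buildGroups p = none := by
  induction p with
  | nil => simp at h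
  | cons c cs ih =>
    by_cases hc : (4:Int) < c
    · rw [buildGroups, if_pos (by simpa [pySuits] using hc)]
    · obtain ⟨x, hx, h4⟩ := h
      rw [List.mem_cons] at hx
      rcases hx with rfl | hx
      · exact absurd h4 hc
      · rw [buildGroups, ih ⟨x, hx, h4⟩]
        split <;> rfl

-- an emptied accumulator stays empty through the generator
theorem foldl_gstep_nil (f : Int → List (List String)) : ∀ (p : List Int),
    p.foldl (gstep f) [] = [] := by
  intro p
  induction p with
  | nil => rfl
  | cons c cs ih => rw [List.foldl_cons]; exact ih

theorem foldl_gstep_nil_of_big : ∀ (p : List Int), (∃ x ∈ p, (4:Int) < x) →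
    ∀ (acc : List (List String)), p.foldl (gstep piecesB) acc = [] := by
  intro p
  induction p with
  | nil => intro h; simp at h
  | cons c cs ih =>
    intro h acc
    rw [List.foldl_cons]
    by_cases hc : (4:Int) < c
    · have hemp : piecesB c = [] :=
        PySem.List.combinations_eq_nil_of_length_lt _ (by simp [pySuits]; omega)
      rw [show gstep piecesB acc c = [] from by simp [gstep, hemp]]
      exact foldl_gstep_nil piecesB cs
    · obtain ⟨x, hx, h4⟩ := h
      rw [List.mem_cons] at hx
      rcases hx with rfl | hx
      · exact absurd h4 hc
      · exact ih ⟨x, hx, h4⟩ _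

theorem genW_eq_nil (p : List Int) (h : ∃ x ∈ p, (4:Int) < x) : genW piecesB p = [] :=
  foldl_gstep_nil_of_big p h [[]]

-- ===== VERDICT (by name: the statement is the Claim_ definition above) =====
theorem suit_arrangement_spec : Claim_equal_suit_arrangement := by
  unfold Claim_equal_suit_arrangement
  intro p _ hpre
  unfold Spec_suit_arrangement
  cases p with
  | nil => rfl
  | cons c cs =>
    have hA : suit_arrangement (c :: cs)
        = (genW piecesB (c :: cs)).foldl (fun uniq r =>
            if uniq.any (fun u => is_isomorphic r u (c :: cs)) then uniq
            else uniq ++ [r]) [] := by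
      show (PySem.List.sorted (PySem.Set.ofList (agen (c :: cs))) (fun x => x) false).foldl
        (fun unique_arrangements result =>
          if unique_arrangements.any (fun u => is_isomorphic result u (c :: cs)) then unique_arrangements
          else unique_arrangements ++ [result]) [] = _
      rw [results_sorted_eq]
    by_cases hball : ∀ x ∈ (c :: cs), x ≤ (4:Int)
    · -- every group is inhabited: the full product/dedup argument
      have hpre' : ∀ x ∈ (c :: cs), (0:Int) ≤ x := by
        intro x hxmem
        by_contra hneg
        obtain ⟨i, hi, hx⟩ := List.mem_iff_getElem.mp hxmem
        obtain ⟨y, hy, h4y⟩ := hpre i hi (by rw [List.getD_eq_getElem _ _ hi, hx]; omega)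
        exact absurd (hball y (List.mem_of_mem_take hy)) (by omega)
      have hshape : ∀ arr ∈ prodG (c :: cs),
          List.Forall₂ (fun (g : List String) (cc : Int) => (g.length : Int) = cc) arr (c :: cs) := by
        intro arr harr
        obtain ⟨t, ht, gs, hgs, rfl⟩ := (mem_prod_foldl (c :: cs) [[]] arr).mp harr
        rw [List.mem_singleton] at ht
        subst ht
        rw [List.nil_append]
        exact shape_len (c :: cs) hpre' gs hgs
      have hB : suit_arrangement_alt (c :: cs) = ((prodG (c :: cs)).foldl bstep PySem.Dict.empty).values := by
        show (if (c :: cs).isEmpty then ([] : List (List String)) else _) = _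
        rw [List.isEmpty_cons, if_neg (by simp)]
        show (match buildGroups (c :: cs) with
          | none => ([] : List (List String))
          | some groups =>
            ((groups.foldl (fun (acc : List (List (List String))) (g : List (List String)) => acc.flatMap (fun t => g.map (fun x => t ++ [x])))
                ([[]] : List (List (List String)))).foldl
              (fun (canon : PySem.Dict (List (List Int)) (List String)) arrangement =>
                let signature :=
                  (PySem.List.enumerate arrangement).foldl
                    (fun (sig : PySem.Dict String (List Int)) (gi : Int × List String) =>
                      gi.2.foldl (fun sig suit => sig.modify suit [] (· ++ [gi.1])) sig)
                    PySem.Dict.empty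
                let key := PySem.List.sorted signature.values (fun x => x) false
                if canon.contains key then canon else canon.insert key arrangement.flatten)
              PySem.Dict.empty).values) = _
        rw [buildGroups_some (c :: cs) hball]
        rfl
      rw [hA, hB, ← prodG_flatten, List.foldl_map]
      refine dedup (c :: cs) (prodG (c :: cs)) [] PySem.Dict.empty rfl ?_ ?_ ?_
      · intro arr harr
        exact bkey_eq (c :: cs) arr (hshape arr harr)
      · intro arr _ u hu
        exact absurd hu (List.not_mem_nil)
      · intro arr harr arr' harr'
        have e1 := flat_sum arr (c :: cs) (hshape arr harr)
        have e2 := flat_sum arr' (c :: cs) (hshape arr' harr')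
        omega
    · -- some count exceeds 4: both sides are empty
      push Not at hball
      obtain ⟨x, hx, h4⟩ := hball
      have hBn : suit_arrangement_alt (c :: cs) = [] := by
        show (if (c :: cs).isEmpty then ([] : List (List String)) else _) = _
        rw [List.isEmpty_cons, if_neg (by simp), buildGroups_none (c :: cs) ⟨x, hx, h4⟩]
      rw [hA, hBn, genW_eq_nil (c :: cs) ⟨x, hx, h4⟩]
      rfl
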